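-- pv_equiv track=rewrite | github.com/sean-lai-sh/dsa | Lab06_recursion/Recursive_Functions.py | sum_triangle
-- ===== SOURCE A (Python) =====
-- def sum_triangle(lst):
--     if len(lst) == 1:
--         return lst
--     new_len = len(lst) - 1
--     new_lst = []
--     for i in range(new_len):
--         new_lst.append(lst[i] + lst[i + 1])
--     return sum_triangle(new_lst)
-- ===== SOURCE B (Python) =====
-- def sum_triangle(lst):
--     # Closed form: the triangle of adjacent sums collapses to the
--     # binomial-weighted sum  sum(lst[i] * C(n-1, i)), computed in one pass
--     # with an incrementally updated binomial coefficient.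
--     n = len(lst)
--     total = 0
--     c = 1  # C(n-1, i)
--     for i, x in enumerate(lst):
--         total += x * c
--         c = c * (n - 1 - i) // (i + 1)
--     return [total]
-- ===== Notes on version B (the rewrite author's own statement) =====
-- stated objective: faster
-- what changed: Replaces the O(n^2) recursive pairwise-collapse with a single O(n) pass computing the closed-form binomial-weighted sum sum(lst[i]*C(n-1,i)).
import Mathlib
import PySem

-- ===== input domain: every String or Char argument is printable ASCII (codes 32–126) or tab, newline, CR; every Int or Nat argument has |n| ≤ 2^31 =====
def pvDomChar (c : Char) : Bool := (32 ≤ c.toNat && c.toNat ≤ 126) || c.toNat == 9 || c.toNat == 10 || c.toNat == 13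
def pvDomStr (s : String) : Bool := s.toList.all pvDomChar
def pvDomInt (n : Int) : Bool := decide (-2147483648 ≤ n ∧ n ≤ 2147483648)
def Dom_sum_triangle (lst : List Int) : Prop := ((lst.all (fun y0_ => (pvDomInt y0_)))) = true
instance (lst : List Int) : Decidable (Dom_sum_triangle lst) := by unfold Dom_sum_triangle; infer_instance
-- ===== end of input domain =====

-- B replaces A's O(n^2) recursive adjacent-pair collapse by the O(n) closed-form
-- binomial-weighted sum sum(lst[i]*C(n-1,i)); equal on all non-empty lists.
-- ===== PORT A =====
-- A: repeatedly replace the list by its adjacent-pair sums until one element remains.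
-- The 'lst = []' guard only makes the recursion total in Lean: Python A never returns
-- on [] (RecursionError), which Pre_ excludes.
def sum_triangle (lst : List Int) : List Int :=
  if h1 : lst.length = 1 then lst
  else if h2 : lst = [] then []
  else
    let newLst := (List.range (lst.length - 1)).foldl
      (fun acc i => acc ++ [lst.getD i 0 + lst.getD (i + 1) 0]) []
    sum_triangle newLst
termination_by lst.length
decreasing_by
  have hp : 0 < lst.length := List.length_pos_iff.mpr h2
  simp only [PySem.List.foldl_append_singleton_eq_map, List.nil_append,
    List.length_map, List.length_range]
  omega

-- ===== PORT B =====
-- B: one pass; state (total, c, i) with c the running binomial coefficient C(n-1, i).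
def sum_triangle_alt (lst : List Int) : List Int :=
  let n : Int := lst.length
  let r := lst.foldl
    (fun (st : Int × Int × Int) x =>
      (st.1 + x * st.2.1, PySem.Int.floordiv (st.2.1 * (n - 1 - st.2.2)) (st.2.2 + 1), st.2.2 + 1))
    (0, 1, 0)
  [r.1]

-- ===== PRECONDITION & SPEC =====
-- Pre_ excludes only the empty list, on which Python A recurses forever and raises RecursionError.
def Pre_sum_triangle (lst : List Int) : Prop := lst ≠ []
instance (lst : List Int) : Decidable (Pre_sum_triangle lst) := by unfold Pre_sum_triangle; infer_instance
def pvWitness_sum_triangle : List Int := ([1, 2, 3])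

def Spec_sum_triangle (lst : List Int) (out : List Int) : Prop := out = sum_triangle_alt lst
instance (lst : List Int) (out : List Int) : Decidable (Spec_sum_triangle lst out) := by unfold Spec_sum_triangle; infer_instance

-- ===== CLAIM (what is proved, stated in full; the proofs are below) =====
def Claim_equal_sum_triangle : Prop := ∀ (lst : List Int), Dom_sum_triangle lst → Pre_sum_triangle lst → Spec_sum_triangle lst (sum_triangle lst)
-- ===== LEMMAS AND PROOFS =====

-- Binomial-weighted sum of a list, weights C(m, k), C(m, k+1), ...
def wsum (m k : Nat) : List Int → Int
  | [] => 0
  | x :: xs => x * (m.choose k : Int) + wsum m (k + 1) xs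

-- Adjacent-pair sums, structurally.
def adj : List Int → List Int
  | a :: b :: t => (a + b) :: adj (b :: t)
  | _ => []

theorem adj_length (l : List Int) : (adj l).length = l.length - 1 := by
  induction l with
  | nil => simp [adj]
  | cons a t ih =>
    cases t with
    | nil => simp [adj]
    | cons b t' => simp [adj] at ih ⊢; omega

theorem range_map_eq_adj (l : List Int) :
    (List.range (l.length - 1)).map (fun i => l.getD i 0 + l.getD (i + 1) 0) = adj l := by
  induction l with
  | nil => simp [adj]
  | cons a t ih =>
    cases t with
    | nil => simp [adj]
    | cons b t' =>
      have h : (a :: b :: t').length - 1 = (b :: t').length - 1 + 1 := by simp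
      rw [h, List.range_succ_eq_map, List.map_cons, List.map_map]
      have htail : (List.range ((b :: t').length - 1)).map
          ((fun i => (a :: b :: t').getD i 0 + (a :: b :: t').getD (i + 1) 0) ∘ Nat.succ)
          = (List.range ((b :: t').length - 1)).map
              (fun i => (b :: t').getD i 0 + (b :: t').getD (i + 1) 0) := by
        apply List.map_congr_left; intro i _; simp [Function.comp]
      rw [htail, ih]
      simp [adj]

-- Pascal-style telescoping: collapsing adjacent pairs shifts the binomial row.
theorem wsum_adj (m : Nat) (xs : List Int) : ∀ (k : Nat) (x : Int), k + xs.length = m + 1 →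
    wsum m k (adj (x :: xs)) =
      wsum (m + 1) k (x :: xs) - x * (((m + 1).choose k : Int) - (m.choose k : Int)) := by
  induction xs with
  | nil =>
    intro k x hk
    have hk' : k = m + 1 := by simpa using hk
    subst hk'
    simp [adj, wsum, Nat.choose_succ_self]
  | cons y t ih =>
    intro k x hk
    have ht : (k + 1) + t.length = m + 1 := by simp at hk; omega
    rw [show adj (x :: y :: t) = (x + y) :: adj (y :: t) from rfl,
      show wsum m k ((x + y) :: adj (y :: t))
        = (x + y) * (m.choose k : Int) + wsum m (k + 1) (adj (y :: t)) from rfl,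
      ih (k + 1) y ht,
      show wsum (m + 1) k (x :: y :: t)
        = x * ((m + 1).choose k : Int) + wsum (m + 1) (k + 1) (y :: t) from rfl]
    have hp : ((m + 1).choose (k + 1) : Int) = (m.choose k : Int) + (m.choose (k + 1) : Int) := by
      rw [← Nat.cast_add, ← Nat.choose_succ_succ]
    rw [hp]
    ring

theorem wsum_adj_zero (m : Nat) (l : List Int) (hl : l.length = m + 2) :
    wsum m 0 (adj l) = wsum (m + 1) 0 l := by
  cases l with
  | nil => simp at hl
  | cons x xs =>
    have h : 0 + xs.length = m + 1 := by simp at hl; omega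
    rw [wsum_adj m xs 0 x h]
    simp

theorem sum_triangle_closed : ∀ (n : Nat) (lst : List Int), lst.length = n + 1 →
    sum_triangle lst = [wsum n 0 lst] := by
  intro n
  induction n with
  | zero =>
    intro lst h
    match lst, h with
    | [x], _ => simp [sum_triangle, wsum]
  | succ n ih =>
    intro lst h
    rw [sum_triangle]
    have h1 : ¬ lst.length = 1 := by omega
    have h2 : ¬ lst = [] := by intro he; subst he; simp at h
    rw [dif_neg h1, dif_neg h2]
    simp only [PySem.List.foldl_append_singleton_eq_map, List.nil_append]
    rw [range_map_eq_adj]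
    have hlen : (adj lst).length = n + 1 := by rw [adj_length]; omega
    rw [ih (adj lst) hlen, wsum_adj_zero n lst (by omega)]

-- Loop invariant for B: starting at index k with c = C(m, k), the fold adds wsum m k xs.
theorem foldB_inv (m : Nat) (nI : Int) (hn : nI = (m : Int) + 1) :
    ∀ (xs : List Int) (k : Nat) (t : Int), k + xs.length ≤ m + 1 →
    xs.foldl
      (fun (st : Int × Int × Int) x =>
        (st.1 + x * st.2.1, PySem.Int.floordiv (st.2.1 * (nI - 1 - st.2.2)) (st.2.2 + 1), st.2.2 + 1))
      (t, (m.choose k : Int), (k : Int)) =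
      (t + wsum m k xs, (m.choose (k + xs.length) : Int), ((k + xs.length : Nat) : Int)) := by
  intro xs
  induction xs with
  | nil => intro k t _; simp [wsum]
  | cons x xs ih =>
    intro k t hk
    have hkm : k ≤ m := by simp at hk; omega
    have hstep : PySem.Int.floordiv ((m.choose k : Int) * (nI - 1 - (k : Int))) ((k : Int) + 1)
        = (m.choose (k + 1) : Int) := by
      have hcast : nI - 1 - (k : Int) = ((m - k : Nat) : Int) := by
        rw [hn]; push_cast [Nat.cast_sub hkm]; ring
      rw [hcast, ← Nat.cast_mul, ← Nat.choose_succ_right_eq, Nat.cast_mul]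
      rw [mul_comm, PySem.Int.floordiv_eq_ediv_of_pos (by positivity)]
      exact Int.mul_ediv_cancel_left _ (by positivity)
    have hk' : (k + 1) + xs.length ≤ m + 1 := by simp at hk; omega
    simp only [List.foldl_cons]
    rw [show ((k : Int) + 1) = ((k + 1 : Nat) : Int) by push_cast; ring] at hstep ⊢
    rw [hstep, ih (k + 1) (t + x * (m.choose k : Int)) hk']
    simp only [wsum, List.length_cons, Prod.mk.injEq]
    have harr : k + (xs.length + 1) = k + 1 + xs.length := by omega
    refine ⟨by ring, by rw [harr], by rw [harr]⟩

theorem sum_triangle_alt_closed (lst : List Int) (hl : lst ≠ []) :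
    sum_triangle_alt lst = [wsum (lst.length - 1) 0 lst] := by
  unfold sum_triangle_alt
  have hlen : lst.length = (lst.length - 1) + 1 :=
    (Nat.succ_pred_eq_of_pos (List.length_pos_iff.mpr hl)).symm
  have hn : (lst.length : Int) = ((lst.length - 1 : Nat) : Int) + 1 := by
    push_cast [Nat.cast_sub (by omega : 1 ≤ lst.length)]; ring
  have := foldB_inv (lst.length - 1) (lst.length : Int) hn lst 0 0 (by omega)
  simp only [Nat.choose_zero_right, Nat.cast_one, Nat.cast_zero] at this
  simp [this]

-- ===== VERDICT (by name: the statement is the Claim_ definition above) =====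
theorem sum_triangle_spec : Claim_equal_sum_triangle := by
  intro lst _ hpre
  unfold Spec_sum_triangle
  have hlen : lst.length = (lst.length - 1) + 1 :=
    (Nat.succ_pred_eq_of_pos (List.length_pos_iff.mpr hpre)).symm
  rw [sum_triangle_closed (lst.length - 1) lst hlen, sum_triangle_alt_closed lst hpre]
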